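-- pv_equiv track=rewrite | github.com/VishwajeetEkal/CSCI-B505-Applied-Algorithms | Assignment 1/Solution.py | CandiesLog
-- ===== SOURCE A (Python) =====
-- def CandiesLog(s):
--     a ={ key:0 for key in s if key>= 'a' and key <='z'}
--
--     total_kids=0
--     f = 0
--     count = 0
--
--     for i in s:
--       if i >= 'a' and i <='z':
--         temp = i
--         total_kids+=1
--         count = 0
--         f=0
--       else:
--         if count:
--           a[temp]-= f
--           f *=10
--
--         f += int(i)
--         a[temp] +=f
--         count+=1
--
--     answer = "K"+str(total_kids)+"T"+str(sum(a.values()))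
--
--     for i in sorted(a):
--       answer += i+str(a[i])
--
--     res = answer
--     return res
-- ===== SOURCE B (Python) =====
-- def CandiesLog(s):
--     # Run-based tokenizer: each lowercase letter heads a token; its following digit
--     # run is accumulated left to right and added once into a lazily built tally.
--     tally = {}
--     kids = 0
--     i = 0
--     n = len(s)
--     while i < n:
--         c = s[i]
--         kids += 1
--         num = 0
--         j = i + 1
--         while j < n and not ('a' <= s[j] <= 'z'):
--             num = num * 10 + int(s[j])
--             j += 1
--         tally[c] = tally.get(c, 0) + num
--         i = j
--     answer = "K" + str(kids) + "T" + str(sum(tally.values()))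
--     for i in sorted(tally):
--         answer += i + str(tally[i])
--     return answer
-- ===== Notes on version B (the rewrite author's own statement) =====
-- stated objective: alternative
-- what changed: B tokenizes the string into (letter, digit-run) pairs with a nested index scan, parses each run with a single left-to-right accumulation added once into a lazily built dict (dict.get), replacing A's per-character subtract/re-add trick over a pre-zeroed comprehension dict with carried f/count/temp state.
import Mathlib
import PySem

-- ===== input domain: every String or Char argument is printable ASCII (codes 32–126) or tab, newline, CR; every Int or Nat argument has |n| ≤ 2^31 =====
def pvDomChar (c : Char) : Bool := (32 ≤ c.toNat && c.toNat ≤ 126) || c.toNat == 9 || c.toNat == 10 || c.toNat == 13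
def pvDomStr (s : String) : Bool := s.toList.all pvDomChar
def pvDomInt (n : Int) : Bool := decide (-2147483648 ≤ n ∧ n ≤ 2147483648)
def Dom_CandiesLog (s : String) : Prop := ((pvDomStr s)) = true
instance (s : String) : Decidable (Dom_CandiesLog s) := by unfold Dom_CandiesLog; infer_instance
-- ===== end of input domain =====

-- B re-implements the tally as a run-based tokenizer (nested scan, lazily built dict, one
-- addition per digit run) instead of A's per-character subtract/re-add into a pre-zeroed
-- comprehension dict; same asymptotic cost.

-- ===== PORT A =====
-- i >= 'a' and i <= 'z'
def pvIsLower (c : Char) : Bool := decide ('a' ≤ c) && decide (c ≤ 'z')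

-- int(i) for a single character; none = ValueError (excluded by Pre_)
def pvD (c : Char) : Int := (PySem.Int.ofChars? [c]).getD 0

-- the body of A's for-loop; state (a, total_kids, f, count, temp)
def pvStepA (st : PySem.Dict Char Int × Int × Int × Int × Option Char) (i : Char) :
    PySem.Dict Char Int × Int × Int × Int × Option Char :=
  match st with
  | (a, total, f, count, temp) =>
    if pvIsLower i then (a, total + 1, 0, 0, some i)
    else
      match temp with
      | none => (a, total, f, count, none)  -- Python raises UnboundLocalError here; excluded by Pre_
      | some t =>
        let a1 := if count ≠ 0 then a.modify t 0 (fun v => v - f) else a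
        let f1 := if count ≠ 0 then f * 10 else f
        let f2 := f1 + pvD i
        (a1.modify t 0 (fun v => v + f2), total, f2, count + 1, some t)

-- { key:0 for key in s if 'a' <= key <= 'z' }
def pvInit (cs : List Char) : PySem.Dict Char Int :=
  cs.foldl (fun d k => if pvIsLower k then d.insert k 0 else d) PySem.Dict.empty

-- the answer-building lines, identical in both Pythons:
-- "K"+str(total)+"T"+str(sum(a.values())) then letter+str(a[letter]) over sorted(a)
def pvRender (a : PySem.Dict Char Int) (total : Int) : String :=
  let answer := ['K'] ++ PySem.Int.toChars total ++ ['T'] ++ PySem.Int.toChars a.values.sum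
  String.ofList ((PySem.List.sorted a.keys (fun x => x) false).foldl
    (fun ans i => ans ++ [i] ++ PySem.Int.toChars (a.getD i 0)) answer)

def CandiesLog (s : String) : String :=
  let cs := s.toList
  let st := cs.foldl pvStepA (pvInit cs, 0, 0, 0, none)
  pvRender st.1 st.2.1

-- ===== PORT B =====
-- outer while: one step per (letter, digit-run) token; inner while = foldl over the run
def pvGoB : List Char → PySem.Dict Char Int → Int → PySem.Dict Char Int × Int
  | [], tally, kids => (tally, kids)
  | c :: rest, tally, kids =>
      let num := (rest.takeWhile (fun x => !pvIsLower x)).foldl (fun v x => v * 10 + pvD x) 0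
      pvGoB (rest.dropWhile (fun x => !pvIsLower x))
        (tally.insert c (tally.getD c 0 + num)) (kids + 1)
termination_by l => l.length
decreasing_by simpa using Nat.lt_succ_of_le (List.length_dropWhile_le _ _)

def CandiesLog_alt (s : String) : String :=
  let r := pvGoB s.toList PySem.Dict.empty 0
  pvRender r.1 r.2

-- ===== PRECONDITION & SPEC =====
-- Pre_ excludes exactly the inputs where A raises: a character that is neither a lowercase
-- letter nor a digit (ValueError from int(i)), or a digit before any letter (UnboundLocalError).
def Pre_CandiesLog (s : String) : Prop :=
  s.toList.all (fun c => pvIsLower c || c.isDigit) = true ∧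
  s.toList.head?.all pvIsLower = true

instance (s : String) : Decidable (Pre_CandiesLog s) := by unfold Pre_CandiesLog; infer_instance

def pvWitness_CandiesLog : String := "ab12a3"

def Spec_CandiesLog (s : String) (out : String) : Prop := out = CandiesLog_alt s
instance (s : String) (out : String) : Decidable (Spec_CandiesLog s out) := by unfold Spec_CandiesLog; infer_instance

-- ===== CLAIM (what is proved, stated in full; the proofs are below) =====
def Claim_equal_CandiesLog : Prop := ∀ (s : String), Dom_CandiesLog s → Pre_CandiesLog s → Spec_CandiesLog s (CandiesLog s)

-- ===== LEMMAS AND PROOFS =====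

-- the zero entries A's comprehension creates for letters of l not yet in `seen`
def pvZ : List Char → List Char → List (Char × Int)
  | [], _ => []
  | c :: r, seen =>
      if pvIsLower c = true ∧ c ∉ seen then (c, (0 : Int)) :: pvZ r (c :: seen) else pvZ r seen

theorem pvInsert_getD_self (d : PySem.Dict Char Int) (c : Char)
    (hc : d.contains c = true) (hnd : d.keys.Nodup) : d.insert c (d.getD c 0) = d := by
  apply PySem.Dict.ext
  rw [PySem.Dict.items_insert_of_contains d _ hc]
  conv_rhs => rw [← List.map_id d.items]
  apply List.map_congr_left
  intro p hp
  by_cases hpc : p.1 = c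
  · have hmem : (c, p.2) ∈ d.items := by rw [← hpc]; exact hp
    have := PySem.Dict.getD_of_mem_items d hmem hnd 0
    cases p; simp_all
  · simp [hpc]

theorem pvZ_skip (c : Char) (r seen : List Char) (h : pvIsLower c = false) :
    pvZ (c :: r) seen = pvZ r seen := by simp [pvZ, h]

theorem pvZ_run (run : List Char) (r seen : List Char)
    (h : ∀ x ∈ run, pvIsLower x = false) : pvZ (run ++ r) seen = pvZ r seen := by
  induction run with
  | nil => rfl
  | cons x xs ih =>
    rw [List.cons_append, pvZ_skip _ _ _ (h x (by simp)), ih (fun y hy => h y (by simp [hy]))]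

theorem pvZ_mem (l : List Char) : ∀ seen k, k ∈ (pvZ l seen).map Prod.fst → k ∉ seen := by
  induction l with
  | nil => intro seen k h; simp [pvZ] at h
  | cons c r ih =>
    intro seen k h
    by_cases hc : pvIsLower c = true ∧ c ∉ seen
    · simp only [pvZ, if_pos hc, List.map_cons, List.mem_cons] at h
      rcases h with h | h
      · simpa [h] using hc.2
      · have := ih (c :: seen) k h
        intro hk; exact this (by simp [hk])
    · simp only [pvZ, if_neg hc] at h
      exact ih seen k h

theorem pvZ_nodup (l : List Char) : ∀ seen, ((pvZ l seen).map Prod.fst).Nodup := by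
  induction l with
  | nil => intro seen; simp [pvZ]
  | cons c r ih =>
    intro seen
    by_cases hc : pvIsLower c = true ∧ c ∉ seen
    · simp only [pvZ, if_pos hc, List.map_cons, List.nodup_cons]
      refine ⟨fun hmem => ?_, ih (c :: seen)⟩
      exact pvZ_mem r (c :: seen) c hmem (by simp)
    · simp only [pvZ, if_neg hc]; exact ih seen

theorem pvZ_congr (l : List Char) : ∀ seen seen', (∀ k, k ∈ seen ↔ k ∈ seen') →
    pvZ l seen = pvZ l seen' := by
  induction l with
  | nil => intro _ _ _; rfl
  | cons c r ih =>
    intro seen seen' h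
    by_cases hc : pvIsLower c = true ∧ c ∉ seen
    · have hc' : pvIsLower c = true ∧ c ∉ seen' := ⟨hc.1, fun hx => hc.2 ((h c).2 hx)⟩
      simp only [pvZ, if_pos hc, if_pos hc']
      rw [ih (c :: seen) (c :: seen') (fun k => by simp [h k])]
    · have hc' : ¬(pvIsLower c = true ∧ c ∉ seen') := by
        intro hx; exact hc ⟨hx.1, fun hm => hx.2 ((h c).1 hm)⟩
      simp only [pvZ, if_neg hc, if_neg hc']
      exact ih seen seen' h

theorem pvGet?_append (xs ys : List (Char × Int)) (k : Char) :
    (PySem.Dict.mk (xs ++ ys)).get? k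
      = ((PySem.Dict.mk xs).get? k).or ((PySem.Dict.mk ys).get? k) := by
  simp [PySem.Dict.get?, List.find?_append]
  cases List.find? (fun p => p.1 == k) xs <;> simp

-- A's loop over a maximal digit run, entered right after its letter was seen
theorem pvRunA (run : List Char) : ∀ (a : PySem.Dict Char Int) (total f count : Int) (t : Char),
    (∀ x ∈ run, pvIsLower x = false) → a.keys.Nodup → t ∈ a.keys →
    0 ≤ count → (count = 0 → f = 0) →
    List.foldl pvStepA (a, total, f, count, some t) run
      = (a.insert t (a.getD t 0 + (run.foldl (fun v x => v * 10 + pvD x) f - f)), total,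
         run.foldl (fun v x => v * 10 + pvD x) f, count + (run.length : Int), some t) := by
  induction run with
  | nil =>
    intro a total f count t _ hnd hmem _ _
    have hc : a.contains t = true := (PySem.Dict.contains_iff_mem_keys a t).2 hmem
    simp only [List.foldl_nil, List.length_nil, Int.natCast_zero, add_zero, sub_self]
    rw [pvInsert_getD_self a t hc hnd]
  | cons x rs ih =>
    intro a total f count t hrun hnd hmem hcnt hf
    have hx : pvIsLower x = false := hrun x (by simp)
    have hrs : ∀ y ∈ rs, pvIsLower y = false := fun y hy => hrun y (by simp [hy])
    have hstep : pvStepA (a, total, f, count, some t) x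
        = (a.insert t (a.getD t 0 - f + (f * 10 + pvD x)), total, f * 10 + pvD x,
           count + 1, some t) := by
      by_cases h0 : count = 0
      · have hf0 : f = 0 := hf h0
        subst hf0
        simp [pvStepA, hx, h0, PySem.Dict.modify]
      · simp [pvStepA, hx, h0, PySem.Dict.modify, PySem.Dict.getD_insert_self,
          PySem.Dict.insert_insert_self]
    rw [List.foldl_cons, hstep, ih _ total (f * 10 + pvD x) (count + 1) t hrs
        (PySem.Dict.nodup_keys_insert _ _ _ hnd)
        ((PySem.Dict.mem_keys_insert _ _ _ _).2 (Or.inl rfl))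
        (by omega) (by omega)]
    rw [PySem.Dict.getD_insert_self, PySem.Dict.insert_insert_self]
    simp only [List.foldl_cons, List.length_cons]
    refine congrArg₂ Prod.mk (congrArg (a.insert t) (by ring))
      (congrArg₂ Prod.mk rfl (congrArg₂ Prod.mk rfl (congrArg₂ Prod.mk (by push_cast; ring) rfl)))


theorem pvHeadDrop (l : List Char) :
    ((l.dropWhile (fun x => !pvIsLower x)).head?.all pvIsLower) = true := by
  induction l with
  | nil => rfl
  | cons c r ih =>
    by_cases h : pvIsLower c
    · simp [h]
    · simpa [h] using ih

theorem pvMainAux : ∀ (n : Nat) (l : List Char), l.length ≤ n →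
    ∀ (tally : PySem.Dict Char Int) (kids f count : Int) (temp : Option Char),
    l.all (fun c => pvIsLower c || c.isDigit) = true →
    l.head?.all pvIsLower = true →
    tally.keys.Nodup →
    (((List.foldl pvStepA (PySem.Dict.mk (tally.items ++ pvZ l tally.keys), kids, f, count, temp) l).1,
      (List.foldl pvStepA (PySem.Dict.mk (tally.items ++ pvZ l tally.keys), kids, f, count, temp) l).2.1)
      = pvGoB l tally kids) := by
  intro n
  induction n with
  | zero =>
    intro l hl tally kids f count temp _ _ _
    have : l = [] := List.length_eq_zero_iff.mp (Nat.le_zero.mp hl)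
    subst this
    simp [pvZ, pvGoB]
  | succ n ih =>
    intro l hl tally kids f count temp hgood hhead hnd
    cases l with
    | nil => simp [pvZ, pvGoB]
    | cons c rest =>
      have hc : pvIsLower c = true := by simpa using hhead
      have hgood' : ∀ y ∈ rest, (pvIsLower y || y.isDigit) = true := by
        rw [List.all_eq_true] at hgood
        exact fun y hy => hgood y (by simp [hy])
      have hsplit : rest.takeWhile (fun x => !pvIsLower x) ++ rest.dropWhile (fun x => !pvIsLower x) = rest :=
        List.takeWhile_append_dropWhile
      set run := rest.takeWhile (fun x => !pvIsLower x) with hrundef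
      set rest' := rest.dropWhile (fun x => !pvIsLower x) with hrest'def
      have hrun : ∀ x ∈ run, pvIsLower x = false := by
        intro x hx
        simpa using List.mem_takeWhile_imp hx
      set D := PySem.Dict.mk (tally.items ++ pvZ (c :: rest) tally.keys) with hD
      have hDkeys : D.keys = tally.keys ++ (pvZ (c :: rest) tally.keys).map Prod.fst := by
        simp [hD, PySem.Dict.keys]
      have hndD : D.keys.Nodup := by
        rw [hDkeys]
        exact List.Nodup.append hnd (pvZ_nodup _ _)
          (fun a ha hb => pvZ_mem (c :: rest) tally.keys a hb ha)
      have hmemD : c ∈ D.keys := by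
        rw [hDkeys]
        by_cases hcm : c ∈ tally.keys
        · exact List.mem_append_left _ hcm
        · refine List.mem_append_right _ ?_
          simp [pvZ, hc, hcm]
      have hstep : pvStepA (D, kids, f, count, temp) c = (D, kids + 1, 0, 0, some c) := by
        simp [pvStepA, hc]
      set num := run.foldl (fun v x => v * 10 + pvD x) 0 with hnumdef
      set w := tally.getD c 0 + num with hwdef
      set tally' := tally.insert c w with htally'
      have hw : D.getD c 0 + (num - 0) = w := by
        by_cases hcm : c ∈ tally.keys
        · have hv : ∃ v, tally.get? c = some v := by
            rcases h : tally.get? c with _ | v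
            · exact absurd ((PySem.Dict.get?_eq_none_iff_not_mem_keys tally c).mp h) (by simpa using hcm)
            · exact ⟨v, rfl⟩
          obtain ⟨v, hv⟩ := hv
          have : D.get? c = some v := by
            rw [hD, pvGet?_append]
            show ((PySem.Dict.mk tally.items).get? c).or _ = _
            rw [show PySem.Dict.mk tally.items = tally from rfl, hv]
            rfl
          simp [PySem.Dict.getD, this, hwdef, PySem.Dict.getD, hv]
        · have h1 : tally.get? c = none := (PySem.Dict.get?_eq_none_iff_not_mem_keys tally c).mpr hcm
          have hz : pvZ (c :: rest) tally.keys = (c, (0:Int)) :: pvZ rest (c :: tally.keys) := by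
            simp [pvZ, hc, hcm]
          have : D.get? c = some 0 := by
            rw [hD, hz, pvGet?_append]
            show ((PySem.Dict.mk tally.items).get? c).or _ = _
            rw [show PySem.Dict.mk tally.items = tally from rfl, h1, PySem.Dict.get?_mk_cons]
            simp
          simp [PySem.Dict.getD, this, hwdef, h1]
      have hDict : D.insert c (D.getD c 0 + (num - 0))
          = PySem.Dict.mk (tally'.items ++ pvZ rest' tally'.keys) := by
        rw [hw]
        have hDc : D.contains c = true := (PySem.Dict.contains_iff_mem_keys D c).2 hmemD
        apply PySem.Dict.ext
        rw [PySem.Dict.items_insert_of_contains D w hDc]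
        by_cases hcm : c ∈ tally.keys
        · have hct : tally.contains c = true := (PySem.Dict.contains_iff_mem_keys tally c).2 hcm
          have hz1 : pvZ (c :: rest) tally.keys = pvZ rest' tally.keys := by
            have h1 : pvZ (c :: rest) tally.keys = pvZ rest tally.keys := by
              simp [pvZ, hcm]
            rw [h1, ← hsplit, pvZ_run run rest' tally.keys hrun]
          have hkeys' : tally'.keys = tally.keys := PySem.Dict.keys_insert_of_contains tally w hct
          rw [show D.items = tally.items ++ pvZ (c :: rest) tally.keys from rfl, hz1,
            List.map_append, htally', hkeys']
          congr 1
          · exact (PySem.Dict.items_insert_of_contains tally w hct).symm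
          · conv_rhs => rw [← List.map_id (pvZ rest' tally.keys)]
            apply List.map_congr_left
            intro p hp
            have hpn : p.1 ∉ tally.keys :=
              pvZ_mem rest' tally.keys p.1 (List.mem_map_of_mem hp)
            have hne : p.1 ≠ c := fun h => hpn (h ▸ hcm)
            simp [hne]
        · have hct : tally.contains c = false := by
            rcases h : tally.contains c with _ | _
            · rfl
            · exact absurd ((PySem.Dict.contains_iff_mem_keys tally c).1 h) hcm
          have hz1 : pvZ (c :: rest) tally.keys
              = (c, (0:Int)) :: pvZ rest' (c :: tally.keys) := by
            have h1 : pvZ (c :: rest) tally.keys = (c, (0:Int)) :: pvZ rest (c :: tally.keys) := by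
              simp [pvZ, hc, hcm]
            rw [h1, ← hsplit, pvZ_run run rest' (c :: tally.keys) hrun]
          have hkeys' : tally'.keys = tally.keys ++ [c] :=
            PySem.Dict.keys_insert_of_not_contains tally w hct
          have hitems' : tally'.items = tally.items ++ [(c, w)] :=
            PySem.Dict.items_insert_of_not_contains tally w hct
          rw [show D.items = tally.items ++ pvZ (c :: rest) tally.keys from rfl, hz1,
            List.map_append, hitems', hkeys',
            pvZ_congr rest' (tally.keys ++ [c]) (c :: tally.keys) (fun k => by simp [or_comm])]
          rw [List.append_assoc, List.singleton_append]
          congr 1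
          · conv_rhs => rw [← List.map_id tally.items]
            apply List.map_congr_left
            intro p hp
            have hpm : p.1 ∈ tally.keys := List.mem_map_of_mem hp
            have hne : p.1 ≠ c := fun h => hcm (h ▸ hpm)
            simp [hne]
          · rw [List.map_cons]
            congr 1
            · simp
            · conv_rhs => rw [← List.map_id (pvZ rest' (c :: tally.keys))]
              apply List.map_congr_left
              intro p hp
              have hpn : p.1 ∉ c :: tally.keys :=
                pvZ_mem rest' (c :: tally.keys) p.1 (List.mem_map_of_mem hp)
              have hne : p.1 ≠ c := fun h => hpn (by simp [h])
              simp [hne]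
      have hlen' : rest'.length ≤ n := by
        have h1 : rest'.length ≤ rest.length := List.length_dropWhile_le _ _
        have h2 : rest.length + 1 ≤ n + 1 := by simpa using hl
        omega
      have hgood'' : rest'.all (fun c => pvIsLower c || c.isDigit) = true := by
        rw [List.all_eq_true]
        exact fun y hy => hgood' y ((List.dropWhile_sublist _).mem hy)
      have hnd' : tally'.keys.Nodup := PySem.Dict.nodup_keys_insert tally c w hnd
      have hih := ih rest' hlen' tally' (kids + 1) num (0 + (run.length : Int)) (some c)
        hgood'' (pvHeadDrop rest) hnd'
      rw [List.foldl_cons, hstep, ← hsplit, List.foldl_append,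
        pvRunA run D (kids + 1) 0 0 c hrun hndD hmemD le_rfl (fun _ => rfl), hDict]
      rw [hih]
      conv_rhs => rw [pvGoB]
      rw [hsplit]

theorem pvInitAux : ∀ (l : List Char) (d : PySem.Dict Char Int),
    (∀ p ∈ d.items, p.2 = (0 : Int)) → d.keys.Nodup →
    l.foldl (fun d k => if pvIsLower k then d.insert k 0 else d) d
      = PySem.Dict.mk (d.items ++ pvZ l d.keys) := by
  intro l
  induction l with
  | nil => intro d _ _; simp [pvZ]
  | cons c r ih =>
    intro d hz hnd
    by_cases hc : pvIsLower c = true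
    · by_cases hm : c ∈ d.keys
      · have hct : d.contains c = true := (PySem.Dict.contains_iff_mem_keys d c).2 hm
        have hins : d.insert c 0 = d := by
          have hv : ∃ v, d.get? c = some v := by
            rcases h : d.get? c with _ | v
            · exact absurd ((PySem.Dict.get?_eq_none_iff_not_mem_keys d c).mp h) (by simpa using hm)
            · exact ⟨v, rfl⟩
          obtain ⟨v, hv⟩ := hv
          have hv0 : v = 0 := hz (c, v) (PySem.Dict.mem_items_of_get?_eq_some d hv)
          have : d.getD c 0 = 0 := by simp [PySem.Dict.getD, hv, hv0]
          calc d.insert c 0 = d.insert c (d.getD c 0) := by rw [this]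
            _ = d := pvInsert_getD_self d c hct hnd
        rw [List.foldl_cons, if_pos hc, hins, ih d hz hnd]
        have : pvZ (c :: r) d.keys = pvZ r d.keys := by simp [pvZ, hm]
        rw [this]
      · have hct : d.contains c = false := by
          rcases h : d.contains c with _ | _
          · rfl
          · exact absurd ((PySem.Dict.contains_iff_mem_keys d c).1 h) hm
        have hitems : (d.insert c 0).items = d.items ++ [(c, (0 : Int))] :=
          PySem.Dict.items_insert_of_not_contains d 0 hct
        have hkeys : (d.insert c 0).keys = d.keys ++ [c] :=
          PySem.Dict.keys_insert_of_not_contains d 0 hct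
        have hz' : ∀ p ∈ (d.insert c 0).items, p.2 = (0 : Int) := by
          rw [hitems]
          intro p hp
          rcases List.mem_append.mp hp with h | h
          · exact hz p h
          · simp at h; simp [h]
        rw [List.foldl_cons, if_pos hc, ih (d.insert c 0) hz' (PySem.Dict.nodup_keys_insert d c 0 hnd),
          hitems, hkeys, pvZ_congr r (d.keys ++ [c]) (c :: d.keys) (fun k => by simp [or_comm])]
        have : pvZ (c :: r) d.keys = (c, (0 : Int)) :: pvZ r (c :: d.keys) := by
          simp [pvZ, hc, hm]
        rw [this, List.append_assoc, List.singleton_append]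
    · have hcf : pvIsLower c = false := by simpa using hc
      rw [List.foldl_cons, if_neg (by simp [hcf]), ih d hz hnd, pvZ_skip c r d.keys hcf]

-- ===== VERDICT (by name: the statement is the Claim_ definition above) =====
theorem CandiesLog_spec : Claim_equal_CandiesLog := by
  intro s _ hpre
  obtain ⟨hall, hhead⟩ := hpre
  unfold Spec_CandiesLog CandiesLog CandiesLog_alt
  have hempty0 : ∀ p ∈ (PySem.Dict.empty : PySem.Dict Char Int).items, p.2 = (0 : Int) := by
    intro p hp; simp [PySem.Dict.empty] at hp
  have hemptynd : (PySem.Dict.empty : PySem.Dict Char Int).keys.Nodup := by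
    simp [PySem.Dict.keys, PySem.Dict.empty]
  have hinit : pvInit s.toList
      = PySem.Dict.mk (PySem.Dict.empty.items ++ pvZ s.toList (PySem.Dict.empty : PySem.Dict Char Int).keys) :=
    pvInitAux s.toList PySem.Dict.empty hempty0 hemptynd
  have h := pvMainAux s.toList.length s.toList le_rfl PySem.Dict.empty 0 0 0 none hall hhead hemptynd
  rw [← hinit] at h
  have h1 : (List.foldl pvStepA (pvInit s.toList, 0, 0, 0, none) s.toList).1
      = (pvGoB s.toList PySem.Dict.empty 0).1 := congrArg Prod.fst h
  have h2 : (List.foldl pvStepA (pvInit s.toList, 0, 0, 0, none) s.toList).2.1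
      = (pvGoB s.toList PySem.Dict.empty 0).2 := congrArg Prod.snd h
  show pvRender (List.foldl pvStepA (pvInit s.toList, 0, 0, 0, none) s.toList).1
      (List.foldl pvStepA (pvInit s.toList, 0, 0, 0, none) s.toList).2.1
    = pvRender (pvGoB s.toList PySem.Dict.empty 0).1 (pvGoB s.toList PySem.Dict.empty 0).2
  rw [h1, h2]
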